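-- pv_equiv track=rewrite | github.com/Matt740/School | Python Projects ESC180/Project2_Gomoku_Bot.py | detect_rows_vertical_is_win
-- ===== SOURCE A (Python) =====
-- def is_bounded_start(board, y_end, x_end, length, d_y, d_x): # Helper function for is_bounded
--     '''returns True if the sequence of length length that ends at location (y_end, x_end) is bounded at the end opposite of (y_end, x_end)'''
--     if y_end - length*d_y > 7 or y_end - length*d_y < 0:
--         return True
--     elif x_end - length*d_x > 7 or x_end - length*d_x < 0:
--         return True
--     elif board[y_end - length*d_y][x_end - length*d_x] != ' ':
--         return True
--     return False
--
-- def is_bounded_end(board, y_end, x_end, length, d_y, d_x): # Helper function for is_bounded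
--     '''returns True if the sequence of length length that ends at location (y_end, x_end) is bounded at the end (y_end, x_end)'''
--     if y_end + d_y > 7 or y_end + d_y < 0:
--         return True
--     elif x_end + d_x > 7 or x_end + d_x < 0:
--         return True
--     elif board[y_end + d_y][x_end + d_x] != ' ':
--         return True
--     return False
--
-- def is_bounded(board, y_end, x_end, length, d_y, d_x):
--     '''analyses the sequence of length length that ends at location (y_end, x_end). The function returns "OPEN" if the sequence is open, "SEMIOPEN" if the sequence if semi-open, and "CLOSED" if the sequence is closed.'''
--     if is_bounded_start(board, y_end, x_end, length, d_y, d_x) == True and is_bounded_end(board, y_end, x_end, length, d_y, d_x) == True: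
--         return "CLOSED"
--     elif is_bounded_start(board, y_end, x_end, length, d_y, d_x) == True and is_bounded_end(board, y_end, x_end, length, d_y, d_x) == False:
--         return "SEMIOPEN"
--     elif is_bounded_start(board, y_end, x_end, length, d_y, d_x) == False and is_bounded_end(board, y_end, x_end, length, d_y, d_x) == True:
--         return "SEMIOPEN"
--     elif is_bounded_start(board, y_end, x_end, length, d_y, d_x) == False and is_bounded_end(board, y_end, x_end, length, d_y, d_x) == False:
--         return "OPEN"
--
-- def detect_row_is_win(board, col, y_start, x_start, length, d_y, d_x):
--     open_seq_count = 0
--     semi_open_seq_count = 0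
--     closed_seq_count = 0
--     counter = 0
--     while 0 <= y_start + (length-1)*d_y <= 7 and 0 <= x_start + (length-1)*d_x <= 7:
--         for i in range(length):
--             if board[y_start + i*d_y][x_start + i*d_x] == col:
--                 counter += 1
--         if counter == length:
--             if is_bounded(board, y_start, x_start, length, -d_y, -d_x) == "SEMIOPEN":
--                 semi_open_seq_count += 1
--             elif is_bounded(board, y_start, x_start, length, -d_y, -d_x) == "OPEN":
--                 open_seq_count += 1
--             elif is_bounded(board, y_start, x_start, length, -d_y, -d_x) == "CLOSED":
--                 closed_seq_count += 1
--         y_start += d_y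
--         x_start += d_x
--         counter = 0
--     return open_seq_count, semi_open_seq_count, closed_seq_count
--
-- def detect_rows_vertical_is_win(board, col, length):
--     open_seq_count = 0
--     semi_open_seq_count = 0
--     closed_seq_count = 0
--     x_vertical_start = 0
--     res = ()
--     for i in range(1, 9):
--         res += detect_row_is_win(board, col, 0, x_vertical_start, length, 1, 0)
--         x_vertical_start = 0
--         x_vertical_start += i
--     for j in range(1, len(res), 3):
--         semi_open_seq_count += res[j]
--     for k in range(0, len(res), 3):
--         open_seq_count += res[k]
--     for h in range(2, len(res), 3):
--         closed_seq_count += res[h]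
--     return open_seq_count, semi_open_seq_count, closed_seq_count
-- ===== SOURCE B (Python) =====
-- def detect_rows_vertical_is_win(board, col, length):
--     # Streaming run-length DP: one pass down each column keeping the length of
--     # the current run of `col`; each time the run reaches `length` at row y it
--     # yields exactly one window ending at y, classified by the cells at
--     # y - length and y + 1.
--     if length < 1 or length > 8:
--         return 0, 0, 0
--     open_seq_count = 0
--     semi_open_seq_count = 0
--     closed_seq_count = 0
--     for x in range(8):
--         run = 0
--         for y in range(8):
--             run = run + 1 if board[y][x] == col else 0
--             if run >= length:
--                 top_open = y - length >= 0 and board[y - length][x] == ' '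
--                 bot_open = y + 1 <= 7 and board[y + 1][x] == ' '
--                 if top_open and bot_open:
--                     open_seq_count += 1
--                 elif top_open or bot_open:
--                     semi_open_seq_count += 1
--                 else:
--                     closed_seq_count += 1
--     return open_seq_count, semi_open_seq_count, closed_seq_count
-- ===== Notes on version B (the rewrite author's own statement) =====
-- stated objective: simpler
-- what changed: B replaces A's pipeline (per-column while-loop that rescans each length-window with a match counter, a string-returning is_bounded classifier built from two bound helpers, a 24-tuple assembled by concatenation and three strided re-summing loops) by a streaming run-length DP: one pass down each column keeping the length of the current run of col; whenever the run reaches length at row y that is exactly one qualifying window ending at y, classified by the cells at y-length and y+1 and added to one of three running counters.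
import Mathlib
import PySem

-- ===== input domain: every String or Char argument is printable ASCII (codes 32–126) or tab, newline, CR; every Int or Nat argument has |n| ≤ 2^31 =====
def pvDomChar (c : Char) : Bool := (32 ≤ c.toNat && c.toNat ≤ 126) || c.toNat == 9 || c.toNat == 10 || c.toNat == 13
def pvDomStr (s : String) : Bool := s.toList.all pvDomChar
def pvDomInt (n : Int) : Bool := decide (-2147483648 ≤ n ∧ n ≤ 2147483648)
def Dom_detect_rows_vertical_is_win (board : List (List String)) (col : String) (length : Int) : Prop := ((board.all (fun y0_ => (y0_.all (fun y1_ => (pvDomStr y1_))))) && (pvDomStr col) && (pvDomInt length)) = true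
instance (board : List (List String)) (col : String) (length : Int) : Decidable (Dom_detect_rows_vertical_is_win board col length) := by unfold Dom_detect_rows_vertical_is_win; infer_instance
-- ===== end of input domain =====

-- B replaces A's window-rescanning pipeline (while-loop + match counter + string
-- classifier + 24-tuple concatenation + strided re-summing) by a streaming
-- run-length DP: one pass down each column; a run of `col` reaching `length` at
-- row y is one window ending at y, classified by the cells at y-length and y+1
-- (objective: simpler).

-- board[y][x]; the pyGetD defaults are never used on inputs admitted by Pre_ (every index is in range there)
def pvCell (board : List (List String)) (y x : Int) : String :=
  PySem.List.pyGetD (PySem.List.pyGetD board y []) x ""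

-- ===== PORT A =====
def is_bounded_start (board : List (List String)) (y_end x_end length d_y d_x : Int) : Bool :=
  if y_end - length*d_y > 7 ∨ y_end - length*d_y < 0 then true
  else if x_end - length*d_x > 7 ∨ x_end - length*d_x < 0 then true
  else if pvCell board (y_end - length*d_y) (x_end - length*d_x) ≠ " " then true
  else false

def is_bounded_end (board : List (List String)) (y_end x_end length d_y d_x : Int) : Bool :=
  if y_end + d_y > 7 ∨ y_end + d_y < 0 then true
  else if x_end + d_x > 7 ∨ x_end + d_x < 0 then true
  else if pvCell board (y_end + d_y) (x_end + d_x) ≠ " " then true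
  else false

def is_bounded (board : List (List String)) (y_end x_end length d_y d_x : Int) : String :=
  if is_bounded_start board y_end x_end length d_y d_x = true ∧ is_bounded_end board y_end x_end length d_y d_x = true then "CLOSED"
  else if is_bounded_start board y_end x_end length d_y d_x = true ∧ is_bounded_end board y_end x_end length d_y d_x = false then "SEMIOPEN"
  else if is_bounded_start board y_end x_end length d_y d_x = false ∧ is_bounded_end board y_end x_end length d_y d_x = true then "SEMIOPEN"
  else "OPEN"  -- Python's final 'elif' condition: the only case left here

-- A's while-loop; fuel counts iterations (16 strictly exceeds the ≤ 8 iterations any call below can make)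
def detect_row_loop (board : List (List String)) (col : String) (length d_y d_x : Int) :
    Nat → Int → Int → Int → Int → Int → Int × Int × Int
  | 0, _, _, o, s, c => (o, s, c)
  | fuel+1, y_start, x_start, o, s, c =>
    if 0 ≤ y_start + (length-1)*d_y ∧ y_start + (length-1)*d_y ≤ 7 ∧
       0 ≤ x_start + (length-1)*d_x ∧ x_start + (length-1)*d_x ≤ 7 then
      let counter : Int := (PySem.List.pyRange 0 length 1).foldl
        (fun acc i => if pvCell board (y_start + i*d_y) (x_start + i*d_x) == col then acc + 1 else acc) 0
      let osc : Int × Int × Int :=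
        if counter == length then
          if is_bounded board y_start x_start length (-d_y) (-d_x) == "SEMIOPEN" then (o, s+1, c)
          else if is_bounded board y_start x_start length (-d_y) (-d_x) == "OPEN" then (o+1, s, c)
          else if is_bounded board y_start x_start length (-d_y) (-d_x) == "CLOSED" then (o, s, c+1)
          else (o, s, c)
        else (o, s, c)
      detect_row_loop board col length d_y d_x fuel (y_start + d_y) (x_start + d_x) osc.1 osc.2.1 osc.2.2
    else (o, s, c)

def detect_row_is_win (board : List (List String)) (col : String) (y_start x_start length d_y d_x : Int) : Int × Int × Int :=
  detect_row_loop board col length d_y d_x 16 y_start x_start 0 0 0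

def detect_rows_vertical_is_win (board : List (List String)) (col : String) (length : Int) : Int × Int × Int :=
  let st : List Int × Int := (PySem.List.pyRange 1 9 1).foldl
    (fun (st : List Int × Int) i =>
      let t := detect_row_is_win board col 0 st.2 length 1 0
      (st.1 ++ [t.1, t.2.1, t.2.2], 0 + i))
    ([], 0)
  let res := st.1
  let semi_open_seq_count : Int := (PySem.List.pyRange 1 (res.length : Int) 3).foldl
    (fun a j => a + PySem.List.pyGetD res j 0) 0
  let open_seq_count : Int := (PySem.List.pyRange 0 (res.length : Int) 3).foldl
    (fun a k => a + PySem.List.pyGetD res k 0) 0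
  let closed_seq_count : Int := (PySem.List.pyRange 2 (res.length : Int) 3).foldl
    (fun a h => a + PySem.List.pyGetD res h 0) 0
  (open_seq_count, semi_open_seq_count, closed_seq_count)

-- ===== PORT B =====
-- the body of Source B's inner loop: thread the current run length with the three counters
def pvRunStep (board : List (List String)) (col : String) (length x : Int)
    (st : Int × (Int × Int × Int)) (y : Int) : Int × (Int × Int × Int) :=
  let run : Int := if pvCell board y x == col then st.1 + 1 else 0
  if length ≤ run then
    let top_open := decide (0 ≤ y - length) && (pvCell board (y - length) x == " ")
    let bot_open := decide (y + 1 ≤ 7) && (pvCell board (y + 1) x == " ")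
    if top_open && bot_open then (run, (st.2.1 + 1, st.2.2.1, st.2.2.2))
    else if top_open || bot_open then (run, (st.2.1, st.2.2.1 + 1, st.2.2.2))
    else (run, (st.2.1, st.2.2.1, st.2.2.2 + 1))
  else (run, st.2)

def detect_rows_vertical_is_win_alt (board : List (List String)) (col : String) (length : Int) : Int × Int × Int :=
  if length < 1 ∨ length > 8 then (0, 0, 0)
  else
    (PySem.List.pyRange 0 8 1).foldl
      (fun acc x =>
        ((PySem.List.pyRange 0 8 1).foldl (pvRunStep board col length x) (0, acc)).2)
      (0, 0, 0)

-- ===== PRECONDITION & SPEC =====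
-- Pre_ excludes exactly the inputs on which A raises IndexError: when 1 ≤ length ≤ 8 A reads
-- every cell board[y][x] with 0 ≤ y,x ≤ 7 (so the board needs 8 rows of width ≥ 8);
-- for any other length A indexes nothing and returns.
def Pre_detect_rows_vertical_is_win (board : List (List String)) (col : String) (length : Int) : Prop :=
  length < 1 ∨ 8 < length ∨ (8 ≤ board.length ∧ ∀ row ∈ board.take 8, 8 ≤ row.length)
instance (board : List (List String)) (col : String) (length : Int) : Decidable (Pre_detect_rows_vertical_is_win board col length) := by
  unfold Pre_detect_rows_vertical_is_win; infer_instance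

def pvWitness_detect_rows_vertical_is_win : List (List String) × String × Int :=
  (List.replicate 8 (List.replicate 8 " "), "b", 3)

def Spec_detect_rows_vertical_is_win (board : List (List String)) (col : String) (length : Int) (out : Int × Int × Int) : Prop := out = detect_rows_vertical_is_win_alt board col length
instance (board : List (List String)) (col : String) (length : Int) (out : Int × Int × Int) : Decidable (Spec_detect_rows_vertical_is_win board col length out) := by unfold Spec_detect_rows_vertical_is_win; infer_instance

-- ===== CLAIM (what is proved, stated in full; the proofs are below) =====
def Claim_equal_detect_rows_vertical_is_win : Prop := ∀ (board : List (List String)) (col : String) (length : Int), Dom_detect_rows_vertical_is_win board col length → Pre_detect_rows_vertical_is_win board col length → Spec_detect_rows_vertical_is_win board col length (detect_rows_vertical_is_win board col length)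

-- ===== LEMMAS AND PROOFS =====

lemma pv_r19 : PySem.List.pyRange 1 9 1 = [1,2,3,4,5,6,7,8] := by decide
lemma pv_r08 : PySem.List.pyRange 0 8 1 = [0,1,2,3,4,5,6,7] := by decide
lemma pv_r0243 : PySem.List.pyRange 0 24 3 = [0,3,6,9,12,15,18,21] := by decide
lemma pv_r1243 : PySem.List.pyRange 1 24 3 = [1,4,7,10,13,16,19,22] := by decide
lemma pv_r2243 : PySem.List.pyRange 2 24 3 = [2,5,8,11,14,17,20,23] := by decide

-- A's per-column result when the while condition is false at entry
lemma pv_rowA_trivial (board : List (List String)) (col : String) (length : Int)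
    (h : length < 1 ∨ 8 < length) (x : Int) :
    detect_row_is_win board col 0 x length 1 0 = (0, 0, 0) := by
  show detect_row_loop board col length 1 0 (15+1) 0 x 0 0 0 = (0, 0, 0)
  rw [detect_row_loop]
  rw [if_neg (by simp only [mul_one, mul_zero, add_zero]; omega)]

-- is_bounded's two helpers specialised to the vertical direction (d_y, d_x) = (-1, -0)
lemma pv_ibs (board : List (List String)) (x y length : Int)
    (hy0 : 0 ≤ y) (hx0 : 0 ≤ x) (hx7 : x ≤ 7) (h1 : 1 ≤ length) :
    is_bounded_start board y x length (-1) (-0) =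
      !decide (y + length ≤ 7 ∧ pvCell board (y + length) x = " ") := by
  unfold is_bounded_start
  have e1 : y - length * -1 = y + length := by ring
  have e2 : x - length * -0 = x := by ring
  rw [e1, e2]
  split_ifs with a b c <;> simp_all <;> omega

lemma pv_ibe (board : List (List String)) (x y length : Int)
    (hx0 : 0 ≤ x) (hx7 : x ≤ 7) (hyl : y + length ≤ 8) (h1 : 1 ≤ length) :
    is_bounded_end board y x length (-1) (-0) =
      !decide (0 ≤ y - 1 ∧ pvCell board (y - 1) x = " ") := by
  unfold is_bounded_end
  have e1 : y + -1 = y - 1 := by ring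
  have e2 : x + -0 = x := by ring
  rw [e1, e2]
  split_ifs with a b c <;> simp_all <;> omega

-- the abstract per-window step A's while body performs (proof-side characterisation of A)
def pvAStep (board : List (List String)) (col : String) (length x : Int)
    (acc : Int × Int × Int) (y : Int) : Int × Int × Int :=
  if (PySem.List.pyRange 0 length 1).all (fun i => pvCell board (y + i) x == col) then
    let t := decide (1 ≤ y ∧ pvCell board (y - 1) x = " ")
    let b := decide (y + length ≤ 7 ∧ pvCell board (y + length) x = " ")
    if t && b then (acc.1 + 1, acc.2.1, acc.2.2)
    else if t || b then (acc.1, acc.2.1 + 1, acc.2.2)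
    else (acc.1, acc.2.1, acc.2.2 + 1)
  else acc

-- A's match counter reaching `length` is the all-equal test over the window cells
lemma pv_win_eq (board : List (List String)) (col : String) (length x y : Int)
    (h1 : 1 ≤ length) :
    (((PySem.List.pyRange 0 length 1).foldl
        (fun acc i => if pvCell board (y + i) x == col then acc + 1 else acc) 0) == length)
      = (PySem.List.pyRange 0 length 1).all (fun i => pvCell board (y + i) x == col) := by
  rw [PySem.List.foldl_if_add_one (fun i => pvCell board (y + i) x == col)]
  have hlen : (PySem.List.pyRange 0 length 1).length = length.toNat := by
    simp [PySem.List.length_pyRange_one]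
  rw [Bool.eq_iff_iff]
  constructor
  · intro hc
    have hle := List.countP_le_length (p := fun i => pvCell board (y + i) x == col)
      (l := PySem.List.pyRange 0 length 1)
    have : (List.countP (fun i => pvCell board (y + i) x == col) (PySem.List.pyRange 0 length 1) : Int) = length := by
      simpa using hc
    have : List.countP (fun i => pvCell board (y + i) x == col) (PySem.List.pyRange 0 length 1)
        = (PySem.List.pyRange 0 length 1).length := by omega
    have hall := List.countP_eq_length.mp this
    simpa [List.all_eq_true] using hall
  · intro hall
    have hall' : ∀ i ∈ PySem.List.pyRange 0 length 1, (pvCell board (y + i) x == col) = true := by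
      simpa [List.all_eq_true] using hall
    have := List.countP_eq_length.mpr hall'
    simp only [beq_iff_eq]
    omega

-- one iteration of A's while body equals the abstract window step
lemma pv_step_eq (board : List (List String)) (col : String) (length x y o s c : Int)
    (h1 : 1 ≤ length) (hx0 : 0 ≤ x) (hx7 : x ≤ 7) (hy0 : 0 ≤ y) (hyl : y + length ≤ 8) :
    (if ((PySem.List.pyRange 0 length 1).foldl
          (fun acc i => if pvCell board (y + i) x == col then acc + 1 else acc) 0) == length then
      (if is_bounded board y x length (-1) (-0) == "SEMIOPEN" then (o, s + 1, c)
       else if is_bounded board y x length (-1) (-0) == "OPEN" then (o + 1, s, c)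
       else if is_bounded board y x length (-1) (-0) == "CLOSED" then (o, s, c + 1)
       else (o, s, c))
     else (o, s, c)) = pvAStep board col length x (o, s, c) y := by
  rw [pv_win_eq board col length x y h1]
  unfold pvAStep
  by_cases hw : ((PySem.List.pyRange 0 length 1).all (fun i => pvCell board (y + i) x == col)) = true
  · rw [if_pos hw, if_pos hw]
    have hq1 : (1 ≤ y ∧ pvCell board (y - 1) x = " ") ↔ (0 ≤ y - 1 ∧ pvCell board (y - 1) x = " ") := by
      constructor <;> exact fun h => ⟨by omega, h.2⟩
    by_cases hP : (y + length ≤ 7 ∧ pvCell board (y + length) x = " ") <;>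
      by_cases hQ : (1 ≤ y ∧ pvCell board (y - 1) x = " ")
    · have hib : is_bounded board y x length (-1) (-0) = "OPEN" := by
        unfold is_bounded
        rw [pv_ibs board x y length hy0 hx0 hx7 h1, pv_ibe board x y length hx0 hx7 hyl h1]
        split_ifs <;> simp_all
      rw [hib]
      simp [hP, hQ]
      try tauto
    · have hQ' : ¬ (0 ≤ y - 1 ∧ pvCell board (y - 1) x = " ") := fun h => hQ (hq1.mpr h)
      have hib : is_bounded board y x length (-1) (-0) = "SEMIOPEN" := by
        unfold is_bounded
        rw [pv_ibs board x y length hy0 hx0 hx7 h1, pv_ibe board x y length hx0 hx7 hyl h1]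
        split_ifs <;> simp_all
      rw [hib]
      simp [hP, hQ]
      try tauto
    · have hib : is_bounded board y x length (-1) (-0) = "SEMIOPEN" := by
        unfold is_bounded
        rw [pv_ibs board x y length hy0 hx0 hx7 h1, pv_ibe board x y length hx0 hx7 hyl h1]
        split_ifs <;> simp_all
      rw [hib]
      simp [hP, hQ]
      try tauto
    · have hQ' : ¬ (0 ≤ y - 1 ∧ pvCell board (y - 1) x = " ") := fun h => hQ (hq1.mpr h)
      have hib : is_bounded board y x length (-1) (-0) = "CLOSED" := by
        unfold is_bounded
        rw [pv_ibs board x y length hy0 hx0 hx7 h1, pv_ibe board x y length hx0 hx7 hyl h1]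
        split_ifs <;> simp_all
      rw [hib]
      simp [hP, hQ]
      try tauto
  · rw [if_neg hw, if_neg hw]

-- A's whole while loop is the fold of the abstract window step over the window starts
lemma pv_loopA_eq (board : List (List String)) (col : String) (length x : Int)
    (h1 : 1 ≤ length) (hx0 : 0 ≤ x) (hx7 : x ≤ 7) :
    ∀ (fuel : Nat) (y o s c : Int), 0 ≤ y → (9 - length - y).toNat ≤ fuel →
    detect_row_loop board col length 1 0 fuel y x o s c =
      (PySem.List.pyRange y (9 - length) 1).foldl
        (pvAStep board col length x) (o, s, c) := by
  intro fuel
  induction fuel with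
  | zero =>
    intro y o s c hy hf
    rw [PySem.List.pyRange_one_eq_nil (by omega)]
    rfl
  | succ fuel ih =>
    intro y o s c hy hf
    rw [detect_row_loop]
    simp only [mul_one, mul_zero, add_zero, neg_zero]
    by_cases hc : y + length ≤ 8
    · rw [if_pos ⟨by omega, by omega, hx0, hx7⟩]
      rw [ih (y + 1) _ _ _ (by omega) (by omega)]
      rw [PySem.List.pyRange_one_cons (show y < 9 - length by omega), List.foldl_cons]
      congr 1
      exact (pv_step_eq board col length x y o s c h1 hx0 hx7 hy hc)
    · rw [if_neg (by omega)]
      rw [PySem.List.pyRange_one_eq_nil (by omega)]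
      rfl

-- generic helper: a 'decide P && (s == " ")' boolean is 'decide (Q ∧ s = " ")' when P ↔ Q
lemma pv_tb (p q : Prop) [Decidable p] [Decidable q] (hpq : p ↔ q) (s : String) :
    (decide p && (s == " ")) = decide (q ∧ s = " ") := by
  by_cases hs : s = " " <;> by_cases hq : q <;>
    simp [hs, hq, hpq]

-- the classified B step at the row where a run reaches `length` is A's window step at the window start
lemma pv_classify_eq (board : List (List String)) (col : String) (length x ρ o s c a : Int)
    (hm : (pvCell board a x == col) = true) (hge : length ≤ ρ + 1)
    (hw : (PySem.List.pyRange 0 length 1).all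
        (fun i => pvCell board (a - length + 1 + i) x == col) = true) :
    pvRunStep board col length x (ρ, (o, s, c)) a
      = (ρ + 1, pvAStep board col length x (o, s, c) (a - length + 1)) := by
  unfold pvRunStep pvAStep
  simp only [hm, if_true, hw, if_pos hge]
  have ht : (decide (0 ≤ a - length) && (pvCell board (a - length) x == " "))
      = decide (1 ≤ a - length + 1 ∧ pvCell board (a - length + 1 - 1) x = " ") := by
    have e : a - length + 1 - 1 = a - length := by ring
    rw [e]
    exact pv_tb _ _ (by omega) _
  have hb : (decide (a + 1 ≤ 7) && (pvCell board (a + 1) x == " "))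
      = decide (a - length + 1 + length ≤ 7 ∧ pvCell board (a - length + 1 + length) x = " ") := by
    have e : a - length + 1 + length = a + 1 := by ring
    rw [e]
    exact pv_tb _ _ (by omega) _
  rw [ht, hb]
  split_ifs <;> rfl

-- the bridge: B's streaming fold down the rest of a column equals A's fold over the remaining window starts
lemma pv_bridge (board : List (List String)) (col : String) (length x : Int)
    (h1 : 1 ≤ length) (h8 : length ≤ 8) :
    ∀ (k : Nat) (a ρ o s c : Int), a + k = 8 → 0 ≤ a → 0 ≤ ρ → ρ ≤ a →
    (∀ i : Int, a - ρ ≤ i → i < a → (pvCell board i x == col) = true) →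
    (ρ = a ∨ (pvCell board (a - ρ - 1) x == col) = false) →
    ((PySem.List.pyRange a 8 1).foldl (pvRunStep board col length x) (ρ, (o, s, c))).2
      = (PySem.List.pyRange (max 0 (a - length + 1)) (9 - length) 1).foldl
          (pvAStep board col length x) (o, s, c) := by
  intro k
  induction k with
  | zero =>
    intro a ρ o s c ha ha0 hρ0 hρa hrun hmax
    have ha8 : a = 8 := by omega
    subst ha8
    rw [PySem.List.pyRange_one_eq_nil (by omega),
        show max 0 (8 - length + 1) = 9 - length by omega,
        PySem.List.pyRange_one_eq_nil (le_refl _)]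
    rfl
  | succ k ih =>
    intro a ρ o s c ha ha0 hρ0 hρa hrun hmax
    rw [PySem.List.pyRange_one_cons (by omega), List.foldl_cons]
    by_cases hm : (pvCell board a x == col) = true
    · by_cases hge : length ≤ ρ + 1
      · -- a run reaches length at row a: one window, starting at a-length+1
        have hwin : (PySem.List.pyRange 0 length 1).all
            (fun i => pvCell board (a - length + 1 + i) x == col) = true := by
          rw [List.all_eq_true]
          intro i hi
          rw [PySem.List.mem_pyRange_one] at hi
          by_cases hia : a - length + 1 + i = a
          · rw [hia]; exact hm
          · exact hrun _ (by omega) (by omega)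
        rw [pv_classify_eq board col length x ρ o s c a hm hge hwin]
        obtain ⟨o', s', c', h⟩ : ∃ o' s' c',
            pvAStep board col length x (o, s, c) (a - length + 1) = (o', s', c') := ⟨_, _, _, rfl⟩
        rw [h]
        rw [ih (a + 1) (ρ + 1) o' s' c' (by omega) (by omega) (by omega) (by omega)
              (by intro i h1i h2i
                  by_cases hia : i = a
                  · rw [hia]; exact hm
                  · exact hrun _ (by omega) (by omega))
              (by rcases hmax with h | h
                  · left; omega
                  · right; convert h using 3; omega)]
        rw [show max 0 (a - length + 1) = a - length + 1 by omega,
            show max 0 (a + 1 - length + 1) = a - length + 1 + 1 by omega,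
            PySem.List.pyRange_one_cons (show a - length + 1 < 9 - length by omega),
            List.foldl_cons, h]
      · -- run continues but is still shorter than length: both sides skip
        have hstep : pvRunStep board col length x (ρ, (o, s, c)) a = (ρ + 1, (o, s, c)) := by
          simp [pvRunStep, hm, hge]
        rw [hstep]
        have hih := ih (a + 1) (ρ + 1) o s c (by omega) (by omega) (by omega)
            (by omega)
            (by intro i h1i h2i
                by_cases hia : i = a
                · rw [hia]; exact hm
                · exact hrun _ (by omega) (by omega))
            (by rcases hmax with h | h
                · left; omega
                · right; convert h using 3; omega)
        rw [hih]
        by_cases hL : length - 1 ≤ a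
        · -- ρ < length - 1; by maximality the cell a-ρ-1 breaks the window ending at a
          have hnm : (pvCell board (a - ρ - 1) x == col) = false := by
            rcases hmax with h | h
            · exfalso; omega
            · exact h
          rw [show max 0 (a - length + 1) = a - length + 1 by omega,
              PySem.List.pyRange_one_cons (show a - length + 1 < 9 - length by omega), List.foldl_cons]
          have hfail : (PySem.List.pyRange 0 length 1).all
              (fun i => pvCell board (a - length + 1 + i) x == col) = false := by
            rw [List.all_eq_false]
            refine ⟨length - ρ - 2, ?_, ?_⟩
            · rw [PySem.List.mem_pyRange_one]; omega
            · rw [show a - length + 1 + (length - ρ - 2) = a - ρ - 1 by ring]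
              simp [hnm]
          have : pvAStep board col length x (o, s, c) (a - length + 1) = (o, s, c) := by
            unfold pvAStep
            rw [if_neg (by rw [hfail]; exact Bool.false_ne_true)]
          rw [this, show max 0 (a + 1 - length + 1) = a - length + 1 + 1 by omega]
        · rw [show max 0 (a - length + 1) = 0 by omega,
              show max 0 (a + 1 - length + 1) = 0 by omega]
    · -- cell does not match: run resets to 0; any window ending at a fails at cell a
      have hm' : (pvCell board a x == col) = false := Bool.eq_false_iff.mpr hm
      have hstep : pvRunStep board col length x (ρ, (o, s, c)) a = (0, (o, s, c)) := by
        have hno : ¬ length ≤ (0:Int) := by omega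
        simp [pvRunStep, hm', hno]
      rw [hstep]
      have hih := ih (a + 1) 0 o s c (by omega) (by omega) (by omega) (by omega)
          (by intro i h1i h2i; omega)
          (by right; rw [show a + 1 - 0 - 1 = a by ring]; exact hm')
      rw [hih]
      by_cases hL : length - 1 ≤ a
      · rw [show max 0 (a - length + 1) = a - length + 1 by omega,
            PySem.List.pyRange_one_cons (show a - length + 1 < 9 - length by omega), List.foldl_cons]
        have hfail : (PySem.List.pyRange 0 length 1).all
            (fun i => pvCell board (a - length + 1 + i) x == col) = false := by
          rw [List.all_eq_false]
          refine ⟨length - 1, ?_, ?_⟩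
          · rw [PySem.List.mem_pyRange_one]; omega
          · rw [show a - length + 1 + (length - 1) = a by ring]
            simp [hm']
        have : pvAStep board col length x (o, s, c) (a - length + 1) = (o, s, c) := by
          unfold pvAStep
          rw [if_neg (by rw [hfail]; exact Bool.false_ne_true)]
        rw [this, show max 0 (a + 1 - length + 1) = a - length + 1 + 1 by omega]
      · rw [show max 0 (a - length + 1) = 0 by omega,
            show max 0 (a + 1 - length + 1) = 0 by omega]

-- A's per-window fold from (0,0,0): the per-column total
def pvT (board : List (List String)) (col : String) (length x : Int) : Int × Int × Int :=
  (PySem.List.pyRange 0 (9 - length) 1).foldl (pvAStep board col length x) (0, 0, 0)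

lemma pv_rowA_eq (board : List (List String)) (col : String) (length x : Int)
    (h1 : 1 ≤ length) (hx0 : 0 ≤ x) (hx7 : x ≤ 7) :
    detect_row_is_win board col 0 x length 1 0 = pvT board col length x := by
  unfold detect_row_is_win pvT
  exact pv_loopA_eq board col length x h1 hx0 hx7 16 0 0 0 0 (by omega) (by omega)

-- the window step only adds to the accumulator
lemma pv_step_shift (board : List (List String)) (col : String) (length x : Int)
    (o s c u v w y : Int) :
    pvAStep board col length x (o + u, s + v, c + w) y =
      ((pvAStep board col length x (o, s, c) y).1 + u,
       (pvAStep board col length x (o, s, c) y).2.1 + v,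
       (pvAStep board col length x (o, s, c) y).2.2 + w) := by
  unfold pvAStep
  split_ifs <;> simp [Prod.ext_iff] <;> (try split_ifs) <;> simp_all <;> omega

lemma pv_fold_shift (board : List (List String)) (col : String) (length x : Int) (l : List Int) :
    ∀ (o s c : Int),
      l.foldl (pvAStep board col length x) (o, s, c) =
        (o + (l.foldl (pvAStep board col length x) (0, 0, 0)).1,
         s + (l.foldl (pvAStep board col length x) (0, 0, 0)).2.1,
         c + (l.foldl (pvAStep board col length x) (0, 0, 0)).2.2) := by
  induction l with
  | nil => intro o s c; simp
  | cons a l ih =>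
    intro o s c
    simp only [List.foldl_cons]
    have h1 : pvAStep board col length x (o, s, c) a
        = ((pvAStep board col length x ((0:Int), (0:Int), (0:Int)) a).1 + o,
           (pvAStep board col length x ((0:Int), (0:Int), (0:Int)) a).2.1 + s,
           (pvAStep board col length x ((0:Int), (0:Int), (0:Int)) a).2.2 + c) := by
      have := pv_step_shift board col length x 0 0 0 o s c a
      simpa using this
    rw [h1]
    obtain ⟨p, q, r⟩ := pvAStep board col length x ((0:Int), (0:Int), (0:Int)) a
    rw [ih (p + o) (q + s) (r + c), ih p q r]
    simp [Prod.ext_iff]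
    refine ⟨by ring, by ring, by ring⟩

-- B's whole inner (per-column) fold equals the accumulator plus A's per-column total
lemma pv_colB (board : List (List String)) (col : String) (length : Int)
    (h1 : 1 ≤ length) (h8 : length ≤ 8) (x : Int) (acc : Int × Int × Int) :
    ((PySem.List.pyRange 0 8 1).foldl (pvRunStep board col length x) (0, acc)).2
      = (acc.1 + (pvT board col length x).1, acc.2.1 + (pvT board col length x).2.1,
         acc.2.2 + (pvT board col length x).2.2) := by
  obtain ⟨o, s, c⟩ := acc
  rw [pv_bridge board col length x h1 h8 8 0 0 o s c (by omega) (by omega)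
        (by omega) (by omega) (by intro i h1i h2i; omega) (Or.inl rfl)]
  rw [show max 0 (0 - length + 1) = 0 by omega]
  exact pv_fold_shift board col length x _ o s c

-- ===== VERDICT (by name: the statement is the Claim_ definition above) =====
theorem detect_rows_vertical_is_win_spec : Claim_equal_detect_rows_vertical_is_win := by
  intro board col length hdom hpre
  unfold Spec_detect_rows_vertical_is_win
  by_cases htriv : length < 1 ∨ 8 < length
  · have hrow := pv_rowA_trivial board col length htriv
    rw [detect_rows_vertical_is_win_alt, if_pos (by omega)]
    simp only [detect_rows_vertical_is_win, pv_r19, List.foldl_cons, List.foldl_nil, hrow]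
    norm_num
    decide
  · have hl1 : 1 ≤ length := by omega
    have hl8 : length ≤ 8 := by omega
    have h0 := pv_rowA_eq board col length 0 hl1 (by omega) (by omega)
    have h1 := pv_rowA_eq board col length 1 hl1 (by omega) (by omega)
    have h2 := pv_rowA_eq board col length 2 hl1 (by omega) (by omega)
    have h3 := pv_rowA_eq board col length 3 hl1 (by omega) (by omega)
    have h4 := pv_rowA_eq board col length 4 hl1 (by omega) (by omega)
    have h5 := pv_rowA_eq board col length 5 hl1 (by omega) (by omega)
    have h6 := pv_rowA_eq board col length 6 hl1 (by omega) (by omega)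
    have h7 := pv_rowA_eq board col length 7 hl1 (by omega) (by omega)
    rw [detect_rows_vertical_is_win_alt, if_neg (by omega)]
    simp only [pv_colB board col length hl1 hl8]
    simp only [pv_r08, List.foldl_cons, List.foldl_nil]
    simp only [detect_rows_vertical_is_win, pv_r19, List.foldl_cons, List.foldl_nil]
    norm_num [h0, h1, h2, h3, h4, h5, h6, h7]
    refine ⟨?_, ?_, ?_⟩
    all_goals
      simp only [pv_r0243, pv_r1243, pv_r2243, List.foldl_cons, List.foldl_nil]
      norm_num [PySem.List.pyGetD_ofNat']
      try ring
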